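-- pv_equiv track=rewrite | github.com/piotereks/soundDesign | checks/division_test.py | check_dur_sizes
-- ===== SOURCE A (Python) =====
-- def check_dur_sizes(pattern:list, dividor:int, any_all="any"):
--     div_tab ={
--     2: [1,2,4,8,16,32,64],
--     3: [1,3,6,12,24],
--     5: [1,5,10,20]
--     }
--     if any_all == "any":
--         func = any
--     else:
--         func = all
--
--     return func([elem in div_tab[dividor] for elem in pattern])
-- ===== SOURCE B (Python) =====
-- def check_dur_sizes(pattern: list, dividor: int, any_all="any"):
--     # Allowed durations for dividor d are exactly 1 and d*2**k up to a cap: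
--     # d=2 cap 64, d=3 cap 24, d=5 cap 20.  Test each element arithmetically
--     # instead of scanning a table row.
--     cap = {2: 64, 3: 24, 5: 20}[dividor]
--
--     def ok(e):
--         if e == 1:
--             return True
--         if e < dividor or e > cap or e % dividor != 0:
--             return False
--         q = e // dividor
--         return q & (q - 1) == 0  # q is a power of two
--
--     if any_all == "any":
--         return any(ok(e) for e in pattern)
--     return all(ok(e) for e in pattern)
-- ===== Notes on version B (the rewrite author's own statement) =====
-- stated objective: alternative
-- what changed: Replaces the table-row scan per element with an arithmetic membership test: an element is valid iff it is 1 or dividor times a power of two (bit-trick q&(q-1)==0) within the row's cap, so the per-dividor duration lists disappear entirely.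
-- outside the precondition, e.g. on check_dur_sizes([], 7, 'all'): A returns True, B raises KeyError
import Mathlib
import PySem

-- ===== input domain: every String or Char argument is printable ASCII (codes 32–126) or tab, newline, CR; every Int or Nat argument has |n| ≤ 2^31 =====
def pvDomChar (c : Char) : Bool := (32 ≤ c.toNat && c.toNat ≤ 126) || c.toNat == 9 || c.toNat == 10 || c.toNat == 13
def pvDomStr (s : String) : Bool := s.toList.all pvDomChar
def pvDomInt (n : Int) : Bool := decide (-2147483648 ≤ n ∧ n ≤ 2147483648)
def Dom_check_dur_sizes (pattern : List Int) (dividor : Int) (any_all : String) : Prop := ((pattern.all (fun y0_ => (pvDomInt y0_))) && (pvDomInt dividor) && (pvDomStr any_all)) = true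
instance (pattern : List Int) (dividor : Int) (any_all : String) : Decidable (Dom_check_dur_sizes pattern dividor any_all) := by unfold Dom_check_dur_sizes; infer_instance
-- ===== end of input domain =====

-- B drops the per-dividor duration lists: an element is valid iff it is 1 or dividor times a
-- power of two (bit trick) within the row's cap; same return value, alternative algorithm.

-- ===== PORT A =====
def check_dur_sizes (pattern : List Int) (dividor : Int) (any_all : String) : Bool :=
  let div_tab : PySem.Dict Int (List Int) :=
    PySem.Dict.ofList [(2, [1,2,4,8,16,32,64]), (3, [1,3,6,12,24]), (5, [1,5,10,20])]
  -- div_tab[dividor]: KeyError when dividor ∉ {2,3,5}; excluded by Pre_check_dur_sizes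
  let row := (PySem.Dict.get? div_tab dividor).getD []
  let bools := pattern.map (fun elem => row.contains elem)
  if any_all == "any" then bools.any id else bools.all id

-- ===== PORT B =====
-- ok(e) of Source B
def pvOkDur (dividor cap e : Int) : Bool :=
  if e == 1 then true
  else if e < dividor || e > cap || PySem.Int.mod e dividor != 0 then false
  else
    let q := PySem.Int.floordiv e dividor
    PySem.Int.band q (q - 1) == 0

def check_dur_sizes_alt (pattern : List Int) (dividor : Int) (any_all : String) : Bool :=
  let capTab : PySem.Dict Int Int := PySem.Dict.ofList [(2, 64), (3, 24), (5, 20)]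
  -- {2:64,3:24,5:20}[dividor]: KeyError when dividor ∉ {2,3,5}; excluded by Pre_check_dur_sizes
  let cap := (PySem.Dict.get? capTab dividor).getD 0
  if any_all == "any" then pattern.any (fun e => pvOkDur dividor cap e)
  else pattern.all (fun e => pvOkDur dividor cap e)

-- ===== PRECONDITION & SPEC =====
-- Pre_ excludes dividors outside the table: there A raises KeyError whenever pattern is
-- non-empty, and on an empty pattern A's any/all-of-nothing value never consults the table
-- (an accident of the lazy lookup) while B, which always looks up the cap, raises KeyError.
def Pre_check_dur_sizes (pattern : List Int) (dividor : Int) (any_all : String) : Prop :=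
  dividor = 2 ∨ dividor = 3 ∨ dividor = 5
instance (pattern : List Int) (dividor : Int) (any_all : String) : Decidable (Pre_check_dur_sizes pattern dividor any_all) := by unfold Pre_check_dur_sizes; infer_instance
def pvWitness_check_dur_sizes : List Int × Int × String := ([1, 7, 16], 2, "any")

def Spec_check_dur_sizes (pattern : List Int) (dividor : Int) (any_all : String) (out : Bool) : Prop := out = check_dur_sizes_alt pattern dividor any_all
instance (pattern : List Int) (dividor : Int) (any_all : String) (out : Bool) : Decidable (Spec_check_dur_sizes pattern dividor any_all out) := by unfold Spec_check_dur_sizes; infer_instance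

-- ===== CLAIM (what is proved, stated in full; the proofs are below) =====
def Claim_equal_check_dur_sizes : Prop := ∀ (pattern : List Int) (dividor : Int) (any_all : String), Dom_check_dur_sizes pattern dividor any_all → Pre_check_dur_sizes pattern dividor any_all → Spec_check_dur_sizes pattern dividor any_all (check_dur_sizes pattern dividor any_all)

-- ===== LEMMAS AND PROOFS =====
-- pointwise agreement of B's arithmetic test with A's row membership, per dividor
theorem ok_eq_mem_2 (e : Int) : pvOkDur 2 64 e = [(1:Int),2,4,8,16,32,64].contains e := by
  unfold pvOkDur
  by_cases h1 : e = 1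
  · simp [h1]
  by_cases hlo : e < 2
  · simp [h1, hlo, List.contains_eq_mem]; omega
  by_cases hhi : 64 < e
  · simp [h1, hhi, List.contains_eq_mem]; omega
  rw [not_lt] at hlo hhi
  interval_cases e <;> decide

theorem ok_eq_mem_3 (e : Int) : pvOkDur 3 24 e = [(1:Int),3,6,12,24].contains e := by
  unfold pvOkDur
  by_cases h1 : e = 1
  · simp [h1]
  by_cases hlo : e < 3
  · simp [h1, hlo, List.contains_eq_mem]; omega
  by_cases hhi : 24 < e
  · simp [h1, hhi, List.contains_eq_mem]; omega
  rw [not_lt] at hlo hhi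
  interval_cases e <;> decide

theorem ok_eq_mem_5 (e : Int) : pvOkDur 5 20 e = [(1:Int),5,10,20].contains e := by
  unfold pvOkDur
  by_cases h1 : e = 1
  · simp [h1]
  by_cases hlo : e < 5
  · simp [h1, hlo, List.contains_eq_mem]; omega
  by_cases hhi : 20 < e
  · simp [h1, hhi, List.contains_eq_mem]; omega
  rw [not_lt] at hlo hhi
  interval_cases e <;> decide

theorem fold_eq_of_ok (pattern : List Int) (any_all : String) (row : List Int)
    (dividor cap : Int) (hok : ∀ e, pvOkDur dividor cap e = row.contains e) :
    (if any_all == "any" then (pattern.map (fun elem => row.contains elem)).any id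
     else (pattern.map (fun elem => row.contains elem)).all id)
      = (if any_all == "any" then pattern.any (fun e => pvOkDur dividor cap e)
         else pattern.all (fun e => pvOkDur dividor cap e)) := by
  have hfun : (fun e => pvOkDur dividor cap e) = (fun e => row.contains e) := funext hok
  rw [hfun]
  split <;> simp [List.any_map, List.all_map]

-- ===== VERDICT (by name: the statement is the Claim_ definition above) =====
theorem check_dur_sizes_spec : Claim_equal_check_dur_sizes := by
  intro pattern dividor any_all _ hpre
  unfold Spec_check_dur_sizes check_dur_sizes check_dur_sizes_alt
  rcases hpre with h | h | h <;> subst h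
  · exact fold_eq_of_ok pattern any_all _ 2 _ ok_eq_mem_2
  · exact fold_eq_of_ok pattern any_all _ 3 _ ok_eq_mem_3
  · exact fold_eq_of_ok pattern any_all _ 5 _ ok_eq_mem_5
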